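-- pv_equiv track=rewrite | github.com/Davenport-Physics/PyGitExtract | gitextract.py | DateUntilComparison
-- ===== SOURCE A (Python) =====
-- def DateUntilComparison(normal_times, until_date, comp_idx, start):
--
--     if comp_idx < 0:
--         return start+1
--
--     for i in range(len(normal_times)-1, 0, -1):
--
--         if normal_times[i][comp_idx] > until_date[comp_idx]:
--             if comp_idx != 2 and normal_times[i][comp_idx+1] < until_date[comp_idx+1]:
--                 continue
--             elif comp_idx == 0 and normal_times[i][1] > until_date[1] and normal_times[i][2] < until_date[2]:
--                 continue
--             return DateUntilComparison(normal_times, until_date, comp_idx - 1, i)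
--
--     return DateUntilComparison(normal_times, until_date, comp_idx - 1, start)
-- ===== SOURCE B (Python) =====
-- def _matches(t, until_date, c):
--     if t[c] <= until_date[c]:
--         return False
--     if c != 2 and t[c + 1] < until_date[c + 1]:
--         return False
--     if c == 0 and t[1] > until_date[1] and t[2] < until_date[2]:
--         return False
--     return True
--
--
-- def DateUntilComparison(normal_times, until_date, comp_idx, start):
--     for c in range(comp_idx, -1, -1):
--         hits = [i for i in range(1, len(normal_times))
--                 if _matches(normal_times[i], until_date, c)]
--         if hits:
--             start = hits[-1]
--     return start + 1
-- ===== Notes on version B (the rewrite author's own statement) =====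
-- stated objective: simpler
-- what changed: Replaces the recursion over comp_idx with a plain for-loop updating a single `start` accumulator, and replaces the descending first-match scan with an ascending list comprehension of matching indices whose last element is taken.
import Mathlib
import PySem

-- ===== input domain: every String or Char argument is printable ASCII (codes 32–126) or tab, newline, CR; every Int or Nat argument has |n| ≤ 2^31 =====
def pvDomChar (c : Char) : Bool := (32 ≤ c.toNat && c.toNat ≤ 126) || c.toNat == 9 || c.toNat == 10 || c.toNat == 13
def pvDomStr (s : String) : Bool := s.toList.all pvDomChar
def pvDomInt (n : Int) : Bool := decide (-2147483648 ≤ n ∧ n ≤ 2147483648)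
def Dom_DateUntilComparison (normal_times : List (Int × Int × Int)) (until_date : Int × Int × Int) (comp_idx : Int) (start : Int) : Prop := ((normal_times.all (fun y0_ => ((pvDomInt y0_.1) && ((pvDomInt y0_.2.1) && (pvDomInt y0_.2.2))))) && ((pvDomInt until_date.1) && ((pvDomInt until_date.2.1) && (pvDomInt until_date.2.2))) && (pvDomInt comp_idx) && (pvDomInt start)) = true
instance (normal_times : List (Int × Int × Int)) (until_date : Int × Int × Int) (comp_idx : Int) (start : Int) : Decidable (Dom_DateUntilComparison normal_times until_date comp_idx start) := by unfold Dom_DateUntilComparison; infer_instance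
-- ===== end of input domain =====

-- B replaces A's recursion over comp_idx by a plain for-loop carrying a single `start`
-- accumulator, and A's descending first-match scan by an ascending comprehension of
-- matching indices whose last element is taken (objective: simpler).

-- ===== PORT A =====

-- Python tuple indexing t[c]; under Pre_ the index is only ever 0, 1 or 2 (exact there).
def pvTGet (t : Int × Int × Int) (c : Int) : Int :=
  if c = 0 then t.1 else if c = 1 then t.2.1 else t.2.2

-- A's for-loop over the descending index list: `continue` = recurse, `return DateUntil…` = some i.
def pvAScan (normal_times : List (Int × Int × Int)) (until_date : Int × Int × Int)
    (comp_idx : Int) : List Int → Option Int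
  | [] => none
  | i :: rest =>
    if pvTGet (PySem.List.pyGetD normal_times i (0, 0, 0)) comp_idx > pvTGet until_date comp_idx then
      if comp_idx ≠ 2 ∧ pvTGet (PySem.List.pyGetD normal_times i (0, 0, 0)) (comp_idx + 1) < pvTGet until_date (comp_idx + 1) then
        pvAScan normal_times until_date comp_idx rest
      else if comp_idx = 0 ∧ pvTGet (PySem.List.pyGetD normal_times i (0, 0, 0)) 1 > pvTGet until_date 1 ∧ pvTGet (PySem.List.pyGetD normal_times i (0, 0, 0)) 2 < pvTGet until_date 2 then
        pvAScan normal_times until_date comp_idx rest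
      else some i
    else pvAScan normal_times until_date comp_idx rest

def DateUntilComparison (normal_times : List (Int × Int × Int)) (until_date : Int × Int × Int) (comp_idx : Int) (start : Int) : Int :=
  if _h : comp_idx < 0 then start + 1
  else
    match pvAScan normal_times until_date comp_idx
        (PySem.List.pyRange ((normal_times.length : Int) - 1) 0 (-1)) with
    | some i => DateUntilComparison normal_times until_date (comp_idx - 1) i
    | none => DateUntilComparison normal_times until_date (comp_idx - 1) start
termination_by (comp_idx + 1).toNat
decreasing_by all_goals omega

-- ===== PORT B =====

-- Source B's _matches
def pvMatches (t : Int × Int × Int) (until_date : Int × Int × Int) (c : Int) : Bool :=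
  if pvTGet t c ≤ pvTGet until_date c then false
  else if c ≠ 2 ∧ pvTGet t (c + 1) < pvTGet until_date (c + 1) then false
  else if c = 0 ∧ pvTGet t 1 > pvTGet until_date 1 ∧ pvTGet t 2 < pvTGet until_date 2 then false
  else true

def DateUntilComparison_alt (normal_times : List (Int × Int × Int)) (until_date : Int × Int × Int) (comp_idx : Int) (start : Int) : Int :=
  ((PySem.List.pyRange comp_idx (-1) (-1)).foldl (fun st c =>
      let hits := (PySem.List.pyRange 1 (normal_times.length : Int) 1).filter
        (fun i => pvMatches (PySem.List.pyGetD normal_times i (0, 0, 0)) until_date c)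
      -- `if hits: start = hits[-1]`
      match hits.getLast? with
      | some i => i
      | none => st) start) + 1

-- ===== PRECONDITION & SPEC =====
-- Excludes exactly the inputs where A raises IndexError: comp_idx ≥ 3 reaches
-- normal_times[i][comp_idx] on a 3-tuple whenever the loop body runs (length ≥ 2).
def Pre_DateUntilComparison (normal_times : List (Int × Int × Int)) (until_date : Int × Int × Int) (comp_idx : Int) (start : Int) : Prop :=
  comp_idx ≤ 2 ∨ (normal_times.length : Int) ≤ 1
instance (normal_times : List (Int × Int × Int)) (until_date : Int × Int × Int) (comp_idx : Int) (start : Int) : Decidable (Pre_DateUntilComparison normal_times until_date comp_idx start) := by unfold Pre_DateUntilComparison; infer_instance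

def pvWitness_DateUntilComparison : (List (Int × Int × Int)) × (Int × Int × Int) × Int × Int :=
  ([(1, 1, 1), (2, 2, 2)], (1, 6, 15), 2, 0)

def Spec_DateUntilComparison (normal_times : List (Int × Int × Int)) (until_date : Int × Int × Int) (comp_idx : Int) (start : Int) (out : Int) : Prop := out = DateUntilComparison_alt normal_times until_date comp_idx start
instance (normal_times : List (Int × Int × Int)) (until_date : Int × Int × Int) (comp_idx : Int) (start : Int) (out : Int) : Decidable (Spec_DateUntilComparison normal_times until_date comp_idx start out) := by unfold Spec_DateUntilComparison; infer_instance

-- ===== CLAIM (what is proved, stated in full; the proofs are below) =====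
def Claim_equal_DateUntilComparison : Prop := ∀ (normal_times : List (Int × Int × Int)) (until_date : Int × Int × Int) (comp_idx : Int) (start : Int), Dom_DateUntilComparison normal_times until_date comp_idx start → Pre_DateUntilComparison normal_times until_date comp_idx start → Spec_DateUntilComparison normal_times until_date comp_idx start (DateUntilComparison normal_times until_date comp_idx start)

-- ===== LEMMAS AND PROOFS =====

-- A's scan is `find?` of B's predicate.
theorem pvAScan_eq_find (normal_times : List (Int × Int × Int)) (until_date : Int × Int × Int)
    (c : Int) (l : List Int) :
    pvAScan normal_times until_date c l
      = l.find? (fun i => pvMatches (PySem.List.pyGetD normal_times i (0, 0, 0)) until_date c) := by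
  induction l with
  | nil => simp [pvAScan]
  | cons i rest ih =>
    rw [List.find?_cons]
    by_cases hm : pvMatches (PySem.List.pyGetD normal_times i (0, 0, 0)) until_date c
    · rw [hm]
      show pvAScan normal_times until_date c (i :: rest) = some i
      unfold pvMatches at hm
      split_ifs at hm with m1 m2 m3
      unfold pvAScan
      rw [if_pos (by omega), if_neg m2, if_neg m3]
    · rw [Bool.not_eq_true] at hm
      rw [hm]
      show pvAScan normal_times until_date c (i :: rest)
        = rest.find? (fun i => pvMatches (PySem.List.pyGetD normal_times i (0, 0, 0)) until_date c)
      unfold pvAScan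
      split_ifs with g1 g2 g3
      · exact ih
      · exact ih
      · exact absurd (by unfold pvMatches; rw [if_neg (by omega), if_neg g2, if_neg g3] : pvMatches (PySem.List.pyGetD normal_times i (0, 0, 0)) until_date c = true) (by simp [hm])
      · exact ih

-- first match scanning a list backwards = last match scanning it forwards
theorem find?_reverse_eq_getLast?_filter {α : Type} (p : α → Bool) (l : List α) :
    l.reverse.find? p = (l.filter p).getLast? := by
  rw [List.getLast?_eq_head?_reverse, ← List.filter_reverse, List.head?_filter]

-- the body of B's for-loop computes A's choice of the next `start`
theorem pvStep_eq (normal_times : List (Int × Int × Int)) (until_date : Int × Int × Int)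
    (c st : Int) :
    (match ((PySem.List.pyRange 1 (normal_times.length : Int) 1).filter
        (fun i => pvMatches (PySem.List.pyGetD normal_times i (0, 0, 0)) until_date c)).getLast? with
      | some i => i
      | none => st)
    = (match pvAScan normal_times until_date c
        (PySem.List.pyRange ((normal_times.length : Int) - 1) 0 (-1)) with
      | some i => i
      | none => st) := by
  rw [pvAScan_eq_find, PySem.List.pyRange_neg_one_eq_reverse]
  have h1 : ((normal_times.length : Int) - 1) + 1 = (normal_times.length : Int) := by omega
  have h0 : (0 : Int) + 1 = 1 := by norm_num
  rw [h1, h0, find?_reverse_eq_getLast?_filter]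

theorem main_eq (normal_times : List (Int × Int × Int)) (until_date : Int × Int × Int) :
    ∀ (k : Nat) (comp_idx : Int), (comp_idx + 1).toNat = k → ∀ (start : Int),
      DateUntilComparison normal_times until_date comp_idx start
        = DateUntilComparison_alt normal_times until_date comp_idx start := by
  intro k
  induction k with
  | zero =>
    intro c hc st
    have hneg : c < 0 := by omega
    rw [DateUntilComparison, dif_pos hneg]
    unfold DateUntilComparison_alt
    rw [PySem.List.pyRange_neg_one_eq_nil (by omega)]
    simp
  | succ k ih =>
    intro c hc st
    have hpos : ¬ c < 0 := by omega
    have hk : (c - 1 + 1).toNat = k := by omega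
    rw [DateUntilComparison, dif_neg hpos]
    unfold DateUntilComparison_alt
    rw [PySem.List.pyRange_neg_one_cons (by omega : (-1 : Int) < c), List.foldl_cons]
    simp only
    rw [pvStep_eq]
    cases h : pvAScan normal_times until_date c
        (PySem.List.pyRange ((normal_times.length : Int) - 1) 0 (-1)) with
    | some i =>
      simp only [ih (c - 1) hk i]
      unfold DateUntilComparison_alt
      simp
    | none =>
      simp only [ih (c - 1) hk st]
      unfold DateUntilComparison_alt
      simp

-- ===== VERDICT (by name: the statement is the Claim_ definition above) =====
theorem DateUntilComparison_spec : Claim_equal_DateUntilComparison := by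
  intro nt ud c st _ _
  unfold Spec_DateUntilComparison
  exact main_eq nt ud (c + 1).toNat c rfl st
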